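-- pv_equiv track=rewrite | github.com/whatever60/folitools | src/folitools/primer_selection/_02_select_primer_set_by_sgad.py | _indices_for_remove_once
-- ===== SOURCE A (Python) =====
-- def _indices_for_remove_once(pool: list[str], to_remove: list[str]) -> list[int]:
--     """Return indices removed by list.remove-style one-by-one primer deletion."""
--     removed_indices: list[int] = []
--     used_indices: set[int] = set()
--     for seq in to_remove:
--         for idx, pool_seq in enumerate(pool):
--             if pool_seq == seq and idx not in used_indices:
--                 removed_indices.append(idx)
--                 used_indices.add(idx)
--                 break
--     return removed_indices
-- ===== SOURCE B (Python) =====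
-- def _indices_for_remove_once(pool: list[str], to_remove: list[str]) -> list[int]:
--     """Return indices removed by list.remove-style one-by-one primer deletion."""
--     positions: dict[str, list[int]] = {}
--     for idx, seq in enumerate(pool):
--         positions.setdefault(seq, []).append(idx)
--     ptr: dict[str, int] = {}
--     removed_indices: list[int] = []
--     for seq in to_remove:
--         lst = positions.get(seq, [])
--         p = ptr.get(seq, 0)
--         if p < len(lst):
--             removed_indices.append(lst[p])
--             ptr[seq] = p + 1
--     return removed_indices
-- ===== Notes on version B (the rewrite author's own statement) =====
-- stated objective: faster
-- what changed: Instead of rescanning the whole pool (with a used-index set) for every sequence to remove, B builds a seq-to-occurrence-index-list dict in one pass over the pool and consumes each list with a per-seq advancing pointer.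
import Mathlib
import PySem

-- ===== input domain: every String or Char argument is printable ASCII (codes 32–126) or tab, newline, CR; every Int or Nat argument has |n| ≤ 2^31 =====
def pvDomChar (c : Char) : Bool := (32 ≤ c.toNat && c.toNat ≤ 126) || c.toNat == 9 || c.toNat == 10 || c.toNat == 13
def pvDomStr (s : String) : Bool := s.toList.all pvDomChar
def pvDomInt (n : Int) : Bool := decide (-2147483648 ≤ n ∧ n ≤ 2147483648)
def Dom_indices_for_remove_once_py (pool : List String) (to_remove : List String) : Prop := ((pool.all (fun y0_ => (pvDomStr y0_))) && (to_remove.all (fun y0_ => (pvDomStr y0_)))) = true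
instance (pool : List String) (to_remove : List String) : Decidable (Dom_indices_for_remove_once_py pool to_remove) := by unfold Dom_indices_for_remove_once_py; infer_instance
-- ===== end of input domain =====

-- B replaces A's per-removal rescan of the pool by a seq → occurrence-index list built once,
-- consumed with a per-seq advancing pointer (objective: faster, asymptotic).

-- ===== PORT A =====
-- inner 'for idx, pool_seq in enumerate(pool): if … break' loop of A
def aFind (pairs : List (Int × String)) (seq : String) (used : PySem.Set Int) : Option Int :=
  match pairs with
  | [] => none
  | (i, s) :: rest =>
      if s == seq && !(used.contains i) then some i else aFind rest seq used

def indices_for_remove_once_py (pool : List String) (to_remove : List String) : List Int :=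
  (to_remove.foldl
    (fun (st : List Int × PySem.Set Int) seq =>
      match aFind (PySem.List.enumerate pool) seq st.2 with
      | none => st
      | some i => (st.1 ++ [i], st.2.add i))
    ([], PySem.Set.empty)).1

-- ===== PORT B =====
-- positions.setdefault(seq, []).append(idx): d[seq] = d.get(seq, []) ++ [idx]
def bPositions (pool : List String) : PySem.Dict String (List Int) :=
  (PySem.List.enumerate pool).foldl
    (fun d p => d.modify p.2 [] (· ++ [p.1])) PySem.Dict.empty

def indices_for_remove_once_py_alt (pool : List String) (to_remove : List String) : List Int :=
  let positions := bPositions pool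
  (to_remove.foldl
    (fun (st : List Int × PySem.Dict String Int) seq =>
      let lst := positions.getD seq []
      let p := st.2.getD seq 0
      if p < (lst.length : Int) then
        (st.1 ++ [PySem.List.pyGetD lst p 0], st.2.insert seq (p + 1))
      else st)
    ([], PySem.Dict.empty)).1

-- ===== PRECONDITION & SPEC =====
def Spec_indices_for_remove_once_py (pool : List String) (to_remove : List String) (out : List Int) : Prop := out = indices_for_remove_once_py_alt pool to_remove
instance (pool : List String) (to_remove : List String) (out : List Int) : Decidable (Spec_indices_for_remove_once_py pool to_remove out) := by unfold Spec_indices_for_remove_once_py; infer_instance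

-- ===== CLAIM (what is proved, stated in full; the proofs are below) =====
def Claim_equal_indices_for_remove_once_py : Prop := ∀ (pool : List String) (to_remove : List String), Dom_indices_for_remove_once_py pool to_remove → Spec_indices_for_remove_once_py pool to_remove (indices_for_remove_once_py pool to_remove)

-- ===== LEMMAS AND PROOFS =====

-- occurrence list of a sequence in the pool (indices in increasing order)
def occ (pool : List String) (s : String) : List Int :=
  ((PySem.List.enumerate pool).filter (fun p => p.2 == s)).map (·.1)

lemma bPositions_getD (pool : List String) (s : String) :
    (bPositions pool).getD s [] = occ pool s := by
  have h : bPositions pool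
      = ((PySem.List.enumerate pool).map (fun p => (p.2, p.1))).foldl
          (fun d q => d.modify q.1 [] (· ++ [q.2])) PySem.Dict.empty := by
    rw [List.foldl_map]; rfl
  rw [h, PySem.Dict.getD_foldl_modify_append]
  simp [occ, List.filter_map, Function.comp_def]

-- A's inner scan finds the first occurrence of seq whose index is not yet used
lemma aFind_eq (pairs : List (Int × String)) (seq : String) (used : PySem.Set Int) :
    aFind pairs seq used
      = ((pairs.filter (fun p => p.2 == seq)).map (·.1)).find? (fun i => !(used.contains i)) := by
  induction pairs with
  | nil => rfl
  | cons p rest ih =>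
    obtain ⟨i, s⟩ := p
    by_cases hs : (s == seq) = true
    · have hf : (((i, s) :: rest).filter (fun p => p.2 == seq)).map (·.1)
          = i :: ((rest.filter (fun p => p.2 == seq)).map (·.1)) := by
        simp [hs]
      rw [hf, List.find?_cons]
      by_cases hu : used.contains i = true
      · simp only [aFind, hs, hu, Bool.not_true, Bool.and_false]
        rw [if_neg (by simp)]
        exact ih
      · have hu' := Bool.eq_false_iff.mpr hu
        simp only [aFind, hs, hu', Bool.not_false, Bool.and_true, if_true]
    · have hf : (((i, s) :: rest).filter (fun p => p.2 == seq)).map (·.1)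
          = (rest.filter (fun p => p.2 == seq)).map (·.1) := by
        simp [hs]
      rw [hf]
      simp only [aFind, Bool.eq_false_iff.mpr hs, Bool.false_and]
      rw [if_neg (by simp)]
      exact ih

lemma nodup_fst_enumerate (pool : List String) :
    ((PySem.List.enumerate pool).map (·.1)).Nodup := by
  rw [PySem.List.map_fst_enumerate]
  simpa using PySem.List.nodup_pyRange_one 0 (0 + pool.length)

lemma nodup_occ (pool : List String) (s : String) : (occ pool s).Nodup := by
  have hsub : (occ pool s).Sublist ((PySem.List.enumerate pool).map (·.1)) :=
    List.Sublist.map (fun p : Int × String => p.1)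
      (List.filter_sublist (p := fun p => p.2 == s) (l := PySem.List.enumerate pool))
  exact List.Nodup.sublist hsub (nodup_fst_enumerate pool)

lemma occ_disjoint (pool : List String) {s t : String} {x : Int}
    (hs : x ∈ occ pool s) (ht : x ∈ occ pool t) : s = t := by
  simp only [occ, List.mem_map, List.mem_filter] at hs ht
  obtain ⟨⟨i1, a⟩, ⟨h1, ha⟩, rfl⟩ := hs
  obtain ⟨⟨i2, b⟩, ⟨h2, hb⟩, he⟩ := ht
  simp only at ha hb he
  subst he
  have := List.inj_on_of_nodup_map (nodup_fst_enumerate pool) h1 h2 rfl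
  simp_all

-- find? over a list whose first k entries fail the predicate and whose k-th (if any) passes
lemma find?_of_prefix {α : Type} (p : α → Bool) :
    ∀ (L : List α) (k : Nat),
      (∀ j, (h : j < L.length) → j < k → p L[j] = false) →
      (∀ (h : k < L.length), p L[k] = true) →
      L.find? p = L[k]? := by
  intro L
  induction L with
  | nil => intro k _ _; simp
  | cons a L ih =>
    intro k h1 h2
    cases k with
    | zero =>
      have : p a = true := h2 (by simp)
      simp [List.find?, this]
    | succ k =>
      have ha : p a = false := h1 0 (by simp) (by omega)
      simp only [List.find?, ha, List.getElem?_cons_succ]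
      exact ih k (fun j hj hjk => h1 (j+1) (by simpa using hj) (by omega))
        (fun h => h2 (by simpa using h))

-- the coupling invariant between A's used-set and B's pointer dict
def PtrInv (pool : List String) (used : PySem.Set Int) (ptr : PySem.Dict String Int) : Prop :=
  (∀ s : String, 0 ≤ ptr.getD s 0) ∧
  (∀ (s : String) (j : Nat) (h : j < (occ pool s).length),
      (used.contains (occ pool s)[j] = true ↔ (j : Int) < ptr.getD s 0))

lemma main_fold (pool : List String) :
    ∀ (tr : List String) (out : List Int) (used : PySem.Set Int) (ptr : PySem.Dict String Int),
      PtrInv pool used ptr →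
      (tr.foldl
        (fun (st : List Int × PySem.Set Int) seq =>
          match aFind (PySem.List.enumerate pool) seq st.2 with
          | none => st
          | some i => (st.1 ++ [i], st.2.add i))
        (out, used)).1
      = (tr.foldl
        (fun (st : List Int × PySem.Dict String Int) seq =>
          let lst := (bPositions pool).getD seq []
          let p := st.2.getD seq 0
          if p < (lst.length : Int) then
            (st.1 ++ [PySem.List.pyGetD lst p 0], st.2.insert seq (p + 1))
          else st)
        (out, ptr)).1 := by
  intro tr
  induction tr with
  | nil => intro out used ptr _; rfl
  | cons seq rest ih =>
    intro out used ptr inv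
    simp only [List.foldl_cons]
    rw [bPositions_getD]
    set L := occ pool seq with hL
    set k := ptr.getD seq 0 with hk
    have hk0 : 0 ≤ k := inv.1 seq
    have hfind : aFind (PySem.List.enumerate pool) seq used
        = L.find? (fun i => !(used.contains i)) := by
      rw [aFind_eq]; rfl
    by_cases hlt : k < (L.length : Int)
    · have hkn : k.toNat < L.length := by omega
      have hknk : (k.toNat : Int) = k := Int.toNat_of_nonneg hk0
      have hfound : aFind (PySem.List.enumerate pool) seq used = some L[k.toNat] := by
        rw [hfind, find?_of_prefix _ L k.toNat
          (fun j hj hjk => by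
            have h1 := (inv.2 seq j hj).mpr (by omega)
            simp only [Bool.not_eq_false']
            exact h1)
          (fun h => by
            have h2 : ¬ (used.contains L[k.toNat] = true) := by
              rw [inv.2 seq k.toNat h]; omega
            simp only [Bool.not_eq_true']
            exact Bool.eq_false_iff.mpr h2)]
        simp [hkn]
      rw [hfound]
      have hget : PySem.List.pyGetD L k 0 = L[k.toNat] :=
        PySem.List.pyGetD_eq_getElem L 0 hk0 (by omega)
      simp only [hget, if_pos hlt]
      apply ih
      constructor
      · intro s
        by_cases hs : s = seq
        · subst hs; rw [PySem.Dict.getD_insert_self]; omega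
        · rw [PySem.Dict.getD_insert_of_ne ptr _ _ hs]; exact inv.1 s
      · intro s j hj
        have hcontains : (used.add L[k.toNat]).contains (occ pool s)[j] = true
            ↔ ((occ pool s)[j] = L[k.toNat] ∨ used.contains (occ pool s)[j] = true) := by
          simp [PySem.Set.mem_add, or_comm]
        rw [hcontains]
        by_cases hs : s = seq
        · subst hs
          rw [PySem.Dict.getD_insert_self]
          rcases lt_trichotomy j k.toNat with hj1 | hj1 | hj1
          · have := (inv.2 s j hj).mpr (by omega)
            constructor
            · intro _; omega
            · intro _; right; exact this
          · subst hj1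
            constructor
            · intro _; omega
            · intro _; left; rfl
          · have hne : (occ pool s)[j] ≠ L[k.toNat] := by
              intro he
              have := (List.Nodup.getElem_inj_iff (nodup_occ pool s)).mp he
              omega
            have hcu : ¬ (used.contains (occ pool s)[j] = true) := by
              rw [inv.2 s j hj]; omega
            constructor
            · intro hc
              rcases hc with hc | hc
              · exact absurd hc hne
              · exact absurd hc hcu
            · intro hc; omega
        · rw [PySem.Dict.getD_insert_of_ne ptr _ _ hs]
          have hne : (occ pool s)[j] ≠ L[k.toNat] := by
            intro he
            exact hs (occ_disjoint pool (he ▸ List.getElem_mem hj) (List.getElem_mem hkn))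
          rw [← inv.2 s j hj]
          constructor
          · intro hc
            rcases hc with hc | hc
            · exact absurd hc hne
            · exact hc
          · intro hc; right; exact hc
    · have hnone : aFind (PySem.List.enumerate pool) seq used = none := by
        rw [hfind, find?_of_prefix _ L L.length
          (fun j hj _ => by
            have h1 := (inv.2 seq j hj).mpr (by omega)
            simp only [Bool.not_eq_false']
            exact h1)
          (fun h => absurd h (by omega))]
        simp
      rw [hnone, if_neg hlt]
      exact ih out used ptr inv

-- ===== VERDICT (by name: the statement is the Claim_ definition above) =====
theorem indices_for_remove_once_py_spec : Claim_equal_indices_for_remove_once_py := by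
  intro pool to_remove _
  unfold Spec_indices_for_remove_once_py indices_for_remove_once_py indices_for_remove_once_py_alt
  exact main_fold pool to_remove [] PySem.Set.empty PySem.Dict.empty
    ⟨fun s => by simp [PySem.Dict.getD, PySem.Dict.get?, PySem.Dict.empty],
     fun s j h => by simp [PySem.Set.contains, PySem.Set.empty, PySem.Dict.getD, PySem.Dict.get?, PySem.Dict.empty]⟩
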